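-- pv_equiv track=rewrite | github.com/stelar-eu/stelar_3dunet | extras/direct_testing_with_saved_test_set.py | replace_zeros_with_average
-- ===== SOURCE A (Python) =====
-- def replace_zeros_with_average(arr):
--     for i in range(len(arr)):
--         if arr[i] == 0:
--             left = i - 1
--             right = i + 1
--             while left >= 0 and arr[left] == 0:
--                 left -= 1
--             while right < len(arr) and arr[right] == 0:
--                 right += 1
--             if left >= 0 and right < len(arr):
--                 arr[i] = (arr[left] + arr[right]) // 2
--             elif left >= 0:
--                 arr[i] = arr[left]
--             elif right < len(arr):
--                 arr[i] = arr[right]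
--     return arr
-- ===== SOURCE B (Python) =====
-- def replace_zeros_with_average(arr):
--     n = len(arr)
--     # one backward pass: nxt[i] = nearest original non-zero value to the right of i
--     nxt = [None] * n
--     nz = None
--     for i in range(n - 1, -1, -1):
--         nxt[i] = nz
--         if arr[i] != 0:
--             nz = arr[i]
--     # one forward pass: last = nearest non-zero *current* value to the left
--     last = None
--     for i in range(n):
--         v = arr[i]
--         if v == 0:
--             if last is not None and nxt[i] is not None:
--                 v = (last + nxt[i]) // 2
--             elif last is not None:
--                 v = last
--             elif nxt[i] is not None:
--                 v = nxt[i]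
--             arr[i] = v
--         if v != 0:
--             last = v
--     return arr
-- ===== Notes on version B (the rewrite author's own statement) =====
-- stated objective: alternative
-- what changed: Replaces A's per-zero left/right neighbor scans with one backward pass precomputing the next original non-zero value and one forward pass tracking the last non-zero filled value.
import Mathlib
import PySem

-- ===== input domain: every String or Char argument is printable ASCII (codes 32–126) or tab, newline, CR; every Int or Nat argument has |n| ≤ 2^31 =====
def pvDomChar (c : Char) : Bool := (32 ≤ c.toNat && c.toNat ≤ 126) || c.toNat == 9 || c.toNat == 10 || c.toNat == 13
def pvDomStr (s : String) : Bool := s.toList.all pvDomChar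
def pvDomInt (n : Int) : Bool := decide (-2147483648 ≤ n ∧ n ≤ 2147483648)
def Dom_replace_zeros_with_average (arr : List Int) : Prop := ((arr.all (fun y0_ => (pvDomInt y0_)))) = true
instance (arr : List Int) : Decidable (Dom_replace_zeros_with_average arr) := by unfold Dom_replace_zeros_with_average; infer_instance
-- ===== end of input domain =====

-- B replaces A's per-zero left/right neighbor scans by one backward pass (next original non-zero
-- value) plus one forward pass (last non-zero current value) — a different, two-pass algorithm.
-- Both Pythons mutate arr in place and return it; the theorems here are about the return value
-- (the final in-place contents coincide with it in both).

-- ===== PORT A =====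
-- while left >= 0 and arr[left] == 0: left -= 1   (started at left = k, a valid index)
def aLeftAux (arr : List Int) : Nat → Int
  | 0 => if arr.getD 0 0 = 0 then -1 else 0
  | k+1 => if arr.getD (k+1) 0 = 0 then aLeftAux arr k else ((k : Int) + 1)

-- while right < len(arr) and arr[right] == 0: right += 1
def aRightAux (arr : List Int) (n : Nat) (k : Nat) : Nat :=
  if h : k < n then (if arr.getD k 0 = 0 then aRightAux arr n (k+1) else k) else k
  termination_by n - k

def aBody (arr : List Int) (i : Nat) : List Int :=
  if arr.getD i 0 = 0 then
    let left : Int := if i = 0 then -1 else aLeftAux arr (i-1)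
    let right : Nat := aRightAux arr arr.length (i+1)
    if 0 ≤ left ∧ right < arr.length then
      arr.set i (PySem.Int.floordiv (arr.getD left.toNat 0 + arr.getD right 0) 2)
    else if 0 ≤ left then
      arr.set i (arr.getD left.toNat 0)
    else if right < arr.length then
      arr.set i (arr.getD right 0)
    else arr
  else arr

def replace_zeros_with_average (arr : List Int) : List Int :=
  List.foldl aBody arr (List.range arr.length)

-- ===== PORT B =====
-- backward pass of Source B: returns (nxt, nz) — nxt[i] = nearest original non-zero value right of i
def bNext : List Int → List (Option Int) × Option Int
  | [] => ([], none)
  | v :: rest =>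
    let p := bNext rest
    (p.2 :: p.1, if v ≠ 0 then some v else p.2)

-- the if/elif chain of Source B's forward pass on (last, nxt[i])
def fillVal (last nx : Option Int) (v : Int) : Int :=
  if v = 0 then
    match last, nx with
    | some l, some x => PySem.Int.floordiv (l + x) 2
    | some l, none => l
    | none, some x => x
    | none, none => 0
  else v

-- forward pass of Source B
def bGo : List Int → List (Option Int) → Option Int → List Int
  | [], _, _ => []
  | v :: rest, nxs, last =>
    let v' := fillVal last (nxs.headD none) v
    v' :: bGo rest nxs.tail (if v' ≠ 0 then some v' else last)

def replace_zeros_with_average_alt (arr : List Int) : List Int :=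
  bGo arr (bNext arr).1 none

-- ===== PRECONDITION & SPEC =====
def Spec_replace_zeros_with_average (arr : List Int) (out : List Int) : Prop := out = replace_zeros_with_average_alt arr
instance (arr : List Int) (out : List Int) : Decidable (Spec_replace_zeros_with_average arr out) := by unfold Spec_replace_zeros_with_average; infer_instance

-- ===== CLAIM (what is proved, stated in full; the proofs are below) =====
def Claim_equal_replace_zeros_with_average : Prop := ∀ (arr : List Int), Dom_replace_zeros_with_average arr → Spec_replace_zeros_with_average arr (replace_zeros_with_average arr)

-- ===== LEMMAS AND PROOFS =====

-- first non-zero value of a list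
def nzRight : List Int → Option Int
  | [] => none
  | v :: r => if v ≠ 0 then some v else nzRight r

-- last non-zero value of a list
def lastNZ (xs : List Int) : Option Int := nzRight xs.reverse

-- common functional specification of both programs
def fill (last : Option Int) : List Int → List Int
  | [] => []
  | v :: rest =>
    let v' := fillVal last (nzRight rest) v
    v' :: fill (if v' ≠ 0 then some v' else last) rest

theorem lastNZ_concat (xs : List Int) (w : Int) :
    lastNZ (xs ++ [w]) = if w ≠ 0 then some w else lastNZ xs := by
  simp [lastNZ, nzRight]

theorem bNext_snd (xs : List Int) : (bNext xs).2 = nzRight xs := by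
  induction xs with
  | nil => rfl
  | cons v r ih => simp [bNext, nzRight, ih]

theorem bGo_eq_fill (xs : List Int) (last : Option Int) :
    bGo xs (bNext xs).1 last = fill last xs := by
  induction xs generalizing last with
  | nil => rfl
  | cons v r ih => simp [bNext, bGo, fill, bNext_snd, ih]

theorem getD_append_middle (p t : List Int) (v : Int) :
    (p ++ v :: t).getD p.length 0 = v := by
  simp [List.getD]

theorem set_append_middle (p t : List Int) (v v' : Int) :
    (p ++ v :: t).set p.length v' = p ++ v' :: t := by
  induction p with
  | nil => rfl
  | cons x xs ih => simp [ih]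
-- characterisation of the left while-loop of A, scanning a non-empty prefix out ++ [w]
theorem aLeftAux_spec (out : List Int) (w : Int) (s : List Int) :
    match lastNZ (out ++ [w]) with
    | none => aLeftAux (out ++ w :: s) out.length = -1
    | some a => ∃ k : Nat, aLeftAux (out ++ w :: s) out.length = (k : Int) ∧
        (out ++ w :: s).getD k 0 = a := by
  induction out using List.reverseRecOn generalizing w s with
  | nil =>
    by_cases hw : w = 0
    · simp [lastNZ, nzRight, aLeftAux, hw]
    · simp only [List.nil_append, List.length_nil, lastNZ, List.reverse_cons,
        List.reverse_nil, nzRight, ne_eq, hw, not_false_eq_true, if_pos]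
      exact ⟨0, by simp [aLeftAux, List.getD, hw], by simp [List.getD]⟩
  | append_singleton out' u ih =>
    have hget : ((out' ++ [u]) ++ w :: s).getD (out'.length + 1) 0 = w := by
      simpa using getD_append_middle (out' ++ [u]) s w
    rw [lastNZ_concat]
    by_cases hw : w = 0
    · subst hw
      simp only [ne_eq, not_true_eq_false, if_neg, ite_false, List.length_append,
        List.length_singleton]
      simp only [aLeftAux, hget, if_pos]
      have harr : (out' ++ [u]) ++ (0:Int) :: s = out' ++ u :: ((0:Int) :: s) := by simp
      rw [harr]
      exact ih u ((0:Int) :: s)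
    · rw [if_pos hw]
      simp only [List.length_append, List.length_singleton, aLeftAux, hget, hw, if_neg hw]
      exact ⟨out'.length + 1, by push_cast; ring, by simpa using hget⟩
-- characterisation of the right while-loop of A
theorem aRightAux_spec (pre rest : List Int) :
    match nzRight rest with
    | none => aRightAux (pre ++ rest) (pre ++ rest).length pre.length = (pre ++ rest).length
    | some b => ∃ r : Nat, aRightAux (pre ++ rest) (pre ++ rest).length pre.length = r ∧
        r < (pre ++ rest).length ∧ (pre ++ rest).getD r 0 = b := by
  induction rest generalizing pre with
  | nil =>
    simp [nzRight, aRightAux]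
  | cons x r ih =>
    have hk : pre.length < (pre ++ x :: r).length := by simp
    have hget : (pre ++ x :: r).getD pre.length 0 = x := getD_append_middle pre r x
    by_cases hx : x = 0
    · subst hx
      simp only [nzRight, ne_eq, not_true_eq_false, if_neg, ite_false]
      rw [aRightAux, dif_pos hk, if_pos hget]
      have harr : pre ++ (0:Int) :: r = (pre ++ [0]) ++ r := by simp
      have hlen : pre.length + 1 = (pre ++ [(0:Int)]).length := by simp
      rw [harr, hlen]
      exact ih (pre ++ [0])
    · simp only [nzRight, ne_eq, hx, not_false_eq_true, if_pos]
      exact ⟨pre.length, by rw [aRightAux, dif_pos hk]; simp [hget, hx], hk, hget⟩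

theorem aBody_step (out rest : List Int) (v : Int) :
    aBody (out ++ v :: rest) out.length = out ++ fillVal (lastNZ out) (nzRight rest) v :: rest := by
  have hget : (out ++ v :: rest).getD out.length 0 = v := getD_append_middle out rest v
  by_cases hv : v = 0
  case neg => simp [aBody, hget, hv, fillVal]
  subst hv
  rcases out.eq_nil_or_concat with rfl | ⟨out', w, rfl⟩
  · have hR := aRightAux_spec [(0:Int)] rest
    simp only [List.nil_append, List.length_nil] at hget ⊢
    cases hnz : nzRight rest with
    | none =>
      rw [hnz] at hR
      have hR' : aRightAux ((0:Int) :: rest) (rest.length + 1) 1 = rest.length + 1 := hR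
      simp [aBody, hget, hR', fillVal, lastNZ, nzRight]
    | some b =>
      rw [hnz] at hR
      obtain ⟨r, hr1, hr2, hr3⟩ := hR
      have hr1' : aRightAux ((0:Int) :: rest) (rest.length + 1) 1 = r := hr1
      have hr2' : r < rest.length + 1 := hr2
      have hr3' : ((0:Int) :: rest)[r]?.getD 0 = b := hr3
      have hlt : r < ((0:Int) :: rest).length := by simpa using hr2'
      have hr4 : ((0:Int) :: rest)[r] = b := by
        rw [List.getElem?_eq_getElem hlt] at hr3'
        simpa using hr3'
      simp [aBody, hget, hr1', hr2', hr4, fillVal, lastNZ, nzRight,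
        show ¬ (0:Int) ≤ -1 by omega, List.getD]
      exact hr4
  · simp only [List.concat_eq_append] at hget ⊢
    have hR := aRightAux_spec ((out' ++ [w]) ++ [0]) rest
    rw [show ((out' ++ [w]) ++ [(0:Int)]) ++ rest = (out' ++ [w]) ++ (0:Int) :: rest by simp,
        show ((out' ++ [w]) ++ [(0:Int)]).length = (out' ++ [w]).length + 1 by simp] at hR
    have hL := aLeftAux_spec out' w ((0:Int) :: rest)
    rw [show out' ++ w :: (0:Int) :: rest = (out' ++ [w]) ++ (0:Int) :: rest by simp] at hL
    have hi0 : (out' ++ [w]).length ≠ 0 := by simp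
    have hidx : (out' ++ [w]).length - 1 = out'.length := by simp
    unfold aBody
    rw [hget, if_pos rfl, if_neg hi0, hidx]
    cases hlz : lastNZ (out' ++ [w]) with
    | none =>
      rw [hlz] at hL
      have hL' : aLeftAux ((out' ++ [w]) ++ (0:Int) :: rest) out'.length = -1 := hL
      cases hnz : nzRight rest with
      | none =>
        rw [hnz] at hR
        have hR' : aRightAux ((out' ++ [w]) ++ (0:Int) :: rest)
            ((out' ++ [w]) ++ (0:Int) :: rest).length ((out' ++ [w]).length + 1)
            = ((out' ++ [w]) ++ (0:Int) :: rest).length := hR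
        simp only [hL', hR']
        simp [fillVal, hlz]
      | some b =>
        rw [hnz] at hR
        obtain ⟨r, hr1, hr2, hr3⟩ := hR
        have hr1' : aRightAux ((out' ++ [w]) ++ (0:Int) :: rest)
            ((out' ++ [w]) ++ (0:Int) :: rest).length ((out' ++ [w]).length + 1) = r := hr1
        simp only [hL', hr1',
          show ¬ ((0:Int) ≤ -1 ∧ r < ((out' ++ [w]) ++ (0:Int) :: rest).length) by omega,
          ite_false, show ¬ (0:Int) ≤ -1 by omega, if_pos hr2, hr3]
        rw [set_append_middle]
        simp [fillVal, hlz]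
    | some a =>
      rw [hlz] at hL
      obtain ⟨k, hk1, hk3⟩ := hL
      have hknn : (0:Int) ≤ (k:Int) := Int.natCast_nonneg k
      cases hnz : nzRight rest with
      | none =>
        rw [hnz] at hR
        have hR' : aRightAux ((out' ++ [w]) ++ (0:Int) :: rest)
            ((out' ++ [w]) ++ (0:Int) :: rest).length ((out' ++ [w]).length + 1)
            = ((out' ++ [w]) ++ (0:Int) :: rest).length := hR
        simp only [hk1, hR', show ¬ ((0:Int) ≤ (k:Int) ∧ ((out' ++ [w]) ++ (0:Int) :: rest).length <
          ((out' ++ [w]) ++ (0:Int) :: rest).length) by omega, ite_false, if_pos hknn,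
          Int.toNat_natCast, hk3]
        rw [set_append_middle]
        simp [fillVal, hlz]
      | some b =>
        rw [hnz] at hR
        obtain ⟨r, hr1, hr2, hr3⟩ := hR
        have hr1' : aRightAux ((out' ++ [w]) ++ (0:Int) :: rest)
            ((out' ++ [w]) ++ (0:Int) :: rest).length ((out' ++ [w]).length + 1) = r := hr1
        simp only [hk1, hr1', if_pos (And.intro hknn hr2), Int.toNat_natCast, hk3, hr3]
        rw [set_append_middle]
        simp [fillVal, hlz]

theorem foldl_aBody_eq_fill (s out : List Int) :
    List.foldl aBody (out ++ s) (List.range' out.length s.length) = out ++ fill (lastNZ out) s := by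
  induction s generalizing out with
  | nil => simp [fill]
  | cons v rest ih =>
    rw [List.length_cons, List.range'_succ, List.foldl_cons, aBody_step]
    have h1 : out ++ fillVal (lastNZ out) (nzRight rest) v :: rest
        = (out ++ [fillVal (lastNZ out) (nzRight rest) v]) ++ rest := by simp
    have h2 : out.length + 1 = (out ++ [fillVal (lastNZ out) (nzRight rest) v]).length := by simp
    rw [h1, h2, ih]
    simp [fill, lastNZ_concat]
theorem fill_eq_alt (arr : List Int) : replace_zeros_with_average_alt arr = fill none arr := by
  simp [replace_zeros_with_average_alt, bGo_eq_fill]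

-- ===== VERDICT (by name: the statement is the Claim_ definition above) =====
theorem replace_zeros_with_average_spec : Claim_equal_replace_zeros_with_average := by
  intro arr _
  unfold Spec_replace_zeros_with_average replace_zeros_with_average
  rw [fill_eq_alt]
  have h := foldl_aBody_eq_fill arr []
  simpa [List.range_eq_range', lastNZ, nzRight] using h
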